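-- pv_equiv track=rewrite | github.com/ihsan896/Avci_Ghost | Avci_Ghost.py | pattern_create
-- ===== SOURCE A (Python) =====
-- def pattern_create(length=100):
--     chars = "ABCDEFGHIJKLMNOPQRSTUVWXYZ"
--     chars += chars.lower() + "0123456789"
--     pattern = ""
--     a = b = c = 0
--
--     while len(pattern) < length:
--         pattern += chars[c] + chars[b] + chars[a]
--         a += 1
--         if a == len(chars):
--             a = 0
--             b += 1
--         if b == len(chars):
--             b = 0
--             c += 1
--         if c == len(chars):
--             c = 0
--
--     return pattern[:length]
-- ===== SOURCE B (Python) =====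
-- def pattern_create(length=100):
--     chars = "ABCDEFGHIJKLMNOPQRSTUVWXYZ"
--     chars += chars.lower() + "0123456789"
--     n = len(chars)
--     blocks = (max(length, 0) + 2) // 3
--     parts = [chars[(i // (n * n)) % n] + chars[(i // n) % n] + chars[i % n]
--              for i in range(blocks)]
--     return "".join(parts)[:length]
-- ===== Notes on version B (the rewrite author's own statement) =====
-- stated objective: faster
-- what changed: Replaces A's while-loop with three mutable wrap-around counters, carry branches and repeated string concatenation by computing the needed block count up front and deriving each block's three character indices in closed form from the block number in a single comprehension, joined once and sliced.
import Mathlib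
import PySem

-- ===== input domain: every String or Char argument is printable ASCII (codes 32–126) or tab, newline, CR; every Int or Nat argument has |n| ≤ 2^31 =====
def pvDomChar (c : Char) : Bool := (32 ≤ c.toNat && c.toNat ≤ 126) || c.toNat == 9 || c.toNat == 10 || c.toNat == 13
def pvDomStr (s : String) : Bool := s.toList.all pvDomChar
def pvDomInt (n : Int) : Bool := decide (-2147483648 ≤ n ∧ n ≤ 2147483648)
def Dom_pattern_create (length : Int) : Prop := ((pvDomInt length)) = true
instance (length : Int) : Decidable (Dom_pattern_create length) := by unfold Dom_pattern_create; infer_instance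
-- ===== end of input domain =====

-- B replaces A's three stateful wrap-around counters and while-loop by a direct
-- closed-form index computation per block over range(ceil(length/3)) (objective: faster; a timing run measured B faster at the largest sizes).

-- ===== PORT A =====
-- chars = "A..Z" + lowercase + digits (the concatenation written out as one literal)
def pvChars : List Char :=
  "ABCDEFGHIJKLMNOPQRSTUVWXYZabcdefghijklmnopqrstuvwxyz0123456789".toList

-- the while loop of A; counters a,b,c always stay < 62, so chars[i] never raises
-- and getD is exact here.
def pvLoopA (length : Int) (pattern : List Char) (a b c : Nat) : List Char :=
  if (pattern.length : Int) < length then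
    let pattern' := pattern ++ [pvChars.getD c ' ', pvChars.getD b ' ', pvChars.getD a ' ']
    let a1 := a + 1
    let a2 := if a1 = 62 then 0 else a1
    let b1 := if a1 = 62 then b + 1 else b
    let b2 := if b1 = 62 then 0 else b1
    let c1 := if b1 = 62 then c + 1 else c
    let c2 := if c1 = 62 then 0 else c1
    pvLoopA length pattern' a2 b2 c2
  else pattern
termination_by (length - pattern.length).toNat
decreasing_by simp; omega

-- pattern[:length]: when length ≤ 0 the loop body never runs and pattern = "",
-- so the slice is "" = take length.toNat; when length > 0 the slice is take length.
def pattern_create (length : Int) : String :=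
  String.mk ((pvLoopA length [] 0 0 0).take length.toNat)

-- ===== PORT B =====
-- one 3-char part of Source B's comprehension (n = 62, n*n = 3844)
def pvBlock (i : Nat) : List Char :=
  [pvChars.getD (i / 3844 % 62) ' ', pvChars.getD (i / 62 % 62) ' ', pvChars.getD (i % 62) ' ']

-- blocks = (max(length, 0) + 2) // 3: the argument is nonnegative, so Python's
-- floor division agrees with Nat division after toNat.
def pvBlocks (length : Int) : Nat := (max length 0 + 2).toNat / 3

def pattern_create_alt (length : Int) : String :=
  String.mk ((((List.range (pvBlocks length)).map pvBlock).flatten).take length.toNat)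

-- ===== PRECONDITION & SPEC =====
def Spec_pattern_create (length : Int) (out : String) : Prop := out = pattern_create_alt length
instance (length : Int) (out : String) : Decidable (Spec_pattern_create length out) := by unfold Spec_pattern_create; infer_instance

-- ===== CLAIM (what is proved, stated in full; the proofs are below) =====
def Claim_equal_pattern_create : Prop := ∀ (length : Int), Dom_pattern_create length → Spec_pattern_create length (pattern_create length)

-- ===== LEMMAS AND PROOFS =====

def pvFlat (k : Nat) : List Char := ((List.range k).map pvBlock).flatten

theorem pvFlat_length (k : Nat) : (pvFlat k).length = 3 * k := by
  induction k with
  | zero => rfl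
  | succ n ih =>
      simp [pvFlat, List.range_succ] at *
      simp [ih, pvBlock]
      omega

theorem pvFlat_succ (k : Nat) : pvFlat (k + 1) = pvFlat k ++ pvBlock k := by
  simp [pvFlat, List.range_succ]

theorem pvLoopA_eq (length : Int) (k : Nat) :
    pvLoopA length (pvFlat k) (k % 62) (k / 62 % 62) (k / 3844 % 62)
      = pvFlat (max (pvBlocks length) k) := by
  rw [pvLoopA]
  by_cases h : ((pvFlat k).length : Int) < length
  · rw [if_pos h]
    have hlen : ((pvFlat k).length : Int) = 3 * k := by rw [pvFlat_length]; push_cast; ring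
    have hblocks : k < pvBlocks length := by
      simp [pvBlocks]; rw [hlen] at h; omega
    have hstep : pvFlat k ++ [pvChars.getD (k / 3844 % 62) ' ', pvChars.getD (k / 62 % 62) ' ', pvChars.getD (k % 62) ' ']
        = pvFlat (k + 1) := by rw [pvFlat_succ]; rfl
    -- counter update equals the closed forms at k+1
    have ha : (if k % 62 + 1 = 62 then 0 else k % 62 + 1) = (k + 1) % 62 := by
      split_ifs <;> omega
    have hb : (if (if k % 62 + 1 = 62 then k / 62 % 62 + 1 else k / 62 % 62) = 62 then 0
               else (if k % 62 + 1 = 62 then k / 62 % 62 + 1 else k / 62 % 62)) = (k + 1) / 62 % 62 := by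
      split_ifs <;> omega
    have hc : (if (if (if k % 62 + 1 = 62 then k / 62 % 62 + 1 else k / 62 % 62) = 62 then k / 3844 % 62 + 1 else k / 3844 % 62) = 62 then 0
               else (if (if k % 62 + 1 = 62 then k / 62 % 62 + 1 else k / 62 % 62) = 62 then k / 3844 % 62 + 1 else k / 3844 % 62))
        = (k + 1) / 3844 % 62 := by
      split_ifs <;> omega
    simp only [hstep, ha, hb, hc]
    rw [pvLoopA_eq length (k + 1)]
    congr 1
    omega
  · rw [if_neg h]
    have hlen : ((pvFlat k).length : Int) = 3 * k := by rw [pvFlat_length]; push_cast; ring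
    have : max (pvBlocks length) k = k := by
      simp [pvBlocks]; rw [hlen] at h; omega
    rw [this]
termination_by (length - 3 * k).toNat
decreasing_by
  have hlen : ((pvFlat k).length : Int) = 3 * k := by rw [pvFlat_length]; push_cast; ring
  rw [hlen] at h
  omega

-- ===== VERDICT (by name: the statement is the Claim_ definition above) =====
theorem pattern_create_spec : Claim_equal_pattern_create := by
  intro length _
  unfold Spec_pattern_create pattern_create pattern_create_alt
  have h0 : pvLoopA length [] 0 0 0 = pvFlat (max (pvBlocks length) 0) := pvLoopA_eq length 0
  rw [h0]
  simp [pvFlat]
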